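-- pv_equiv track=rewrite | github.com/homelab-00/TranscriptionSuite | server/docker/bootstrap_runtime.py | summarize_package_delta
-- ===== SOURCE A (Python) =====
-- def summarize_package_delta(
--     before: dict[str, str],
--     after: dict[str, str],
-- ) -> tuple[dict[str, int], dict[str, list[str]]]:
--     before_keys = set(before)
--     after_keys = set(after)
--
--     added = sorted(after_keys - before_keys)
--     removed = sorted(before_keys - after_keys)
--     updated = sorted(key for key in (before_keys & after_keys) if before.get(key) != after.get(key))
--
--     summary = {
--         "added": len(added),
--         "removed": len(removed),
--         "updated": len(updated),
--         "before_count": len(before),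
--         "after_count": len(after),
--     }
--     samples = {
--         "added": added[:10],
--         "removed": removed[:10],
--         "updated": updated[:10],
--     }
--     return summary, samples
-- ===== SOURCE B (Python) =====
-- def summarize_package_delta(before, after):
--     # One classification pass over the ordered union of keys instead of
--     # three separate set-difference/intersection passes.
--     added, removed, updated = [], [], []
--     for key in dict.fromkeys([*before, *after]):
--         if key not in before:
--             added.append(key)
--         elif key not in after:
--             removed.append(key)
--         elif before[key] != after[key]:
--             updated.append(key)
--     added.sort()
--     removed.sort()
--     updated.sort()
--     summary = {
--         "added": len(added),
--         "removed": len(removed),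
--         "updated": len(updated),
--         "before_count": len(before),
--         "after_count": len(after),
--     }
--     samples = {
--         "added": added[:10],
--         "removed": removed[:10],
--         "updated": updated[:10],
--     }
--     return summary, samples
-- ===== Notes on version B (the rewrite author's own statement) =====
-- stated objective: alternative
-- what changed: Replaces A's three set-difference/intersection passes with a single if/elif classification loop over the ordered union of keys (dict.fromkeys of both key lists), sorting the three buckets afterwards.
import Mathlib
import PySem

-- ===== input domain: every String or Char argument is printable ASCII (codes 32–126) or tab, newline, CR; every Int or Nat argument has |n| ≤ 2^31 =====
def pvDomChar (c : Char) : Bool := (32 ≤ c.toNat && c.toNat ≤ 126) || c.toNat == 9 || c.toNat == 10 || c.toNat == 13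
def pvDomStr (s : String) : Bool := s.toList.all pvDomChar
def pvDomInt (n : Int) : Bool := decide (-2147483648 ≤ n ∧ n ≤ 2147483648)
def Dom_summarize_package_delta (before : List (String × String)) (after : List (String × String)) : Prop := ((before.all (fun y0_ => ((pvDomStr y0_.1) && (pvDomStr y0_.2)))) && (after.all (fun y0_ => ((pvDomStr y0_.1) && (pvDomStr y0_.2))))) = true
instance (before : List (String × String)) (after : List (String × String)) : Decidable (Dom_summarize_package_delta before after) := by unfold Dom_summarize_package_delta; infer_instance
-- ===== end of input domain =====

-- B replaces A's three set-difference passes by one if/elif classification loop over the union of keys; same cost, different decomposition.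
-- dicts are the association lists themselves (insertion order, unique keys); added[:10] is List.take 10 (exact for a nonnegative stop).

-- ===== PORT A =====
def summarize_package_delta (before : List (String × String)) (after : List (String × String)) : (List (String × Int)) × (List (String × List String)) :=
  let before_keys : PySem.Set String := PySem.Set.ofList (before.map Prod.fst)
  let after_keys : PySem.Set String := PySem.Set.ofList (after.map Prod.fst)
  let added := PySem.List.sorted (PySem.Set.diff after_keys before_keys) (fun x => x) false
  let removed := PySem.List.sorted (PySem.Set.diff before_keys after_keys) (fun x => x) false
  let updated := PySem.List.sorted ((PySem.Set.inter before_keys after_keys).filter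
      (fun key => (PySem.Dict.mk before).get? key != (PySem.Dict.mk after).get? key)) (fun x => x) false
  let summary : List (String × Int) :=
    [("added", (added.length : Int)), ("removed", (removed.length : Int)), ("updated", (updated.length : Int)),
     ("before_count", (before.length : Int)), ("after_count", (after.length : Int))]
  let samples : List (String × List String) :=
    [("added", added.take 10), ("removed", removed.take 10), ("updated", updated.take 10)]
  (summary, samples)

-- ===== PORT B =====
-- the if/elif classification step of Source B's loop body
def pvClassify (before : List (String × String)) (after : List (String × String))
    (acc : List String × List String × List String) (key : String) :
    List String × List String × List String :=
  if (PySem.Dict.mk before).contains key = false then (acc.1 ++ [key], acc.2.1, acc.2.2)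
  else if (PySem.Dict.mk after).contains key = false then (acc.1, acc.2.1 ++ [key], acc.2.2)
  else if (PySem.Dict.mk before).get? key != (PySem.Dict.mk after).get? key then (acc.1, acc.2.1, acc.2.2 ++ [key])
  else acc

def summarize_package_delta_alt (before : List (String × String)) (after : List (String × String)) : (List (String × Int)) × (List (String × List String)) :=
  let buckets := (PySem.List.dedup (before.map Prod.fst ++ after.map Prod.fst)).foldl (pvClassify before after) ([], [], [])
  let added := PySem.List.sorted buckets.1 (fun x => x) false
  let removed := PySem.List.sorted buckets.2.1 (fun x => x) false
  let updated := PySem.List.sorted buckets.2.2 (fun x => x) false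
  let summary : List (String × Int) :=
    [("added", (added.length : Int)), ("removed", (removed.length : Int)), ("updated", (updated.length : Int)),
     ("before_count", (before.length : Int)), ("after_count", (after.length : Int))]
  let samples : List (String × List String) :=
    [("added", added.take 10), ("removed", removed.take 10), ("updated", updated.take 10)]
  (summary, samples)

-- ===== PRECONDITION & SPEC =====
def Spec_summarize_package_delta (before : List (String × String)) (after : List (String × String)) (out : (List (String × Int)) × (List (String × List String))) : Prop := out = summarize_package_delta_alt before after
instance (before : List (String × String)) (after : List (String × String)) (out : (List (String × Int)) × (List (String × List String))) : Decidable (Spec_summarize_package_delta before after out) := by unfold Spec_summarize_package_delta; infer_instance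

-- ===== CLAIM (what is proved, stated in full; the proofs are below) =====
def Claim_equal_summarize_package_delta : Prop := ∀ (before : List (String × String)) (after : List (String × String)), Dom_summarize_package_delta before after → Spec_summarize_package_delta before after (summarize_package_delta before after)

-- ===== LEMMAS AND PROOFS =====

-- the classification fold is three filters over the iterated list
theorem foldl_pvClassify (before after : List (String × String)) (U : List String)
    (a r u : List String) :
    U.foldl (pvClassify before after) (a, r, u) =
      (a ++ U.filter (fun k => !(PySem.Dict.mk before).contains k),
       r ++ U.filter (fun k => (PySem.Dict.mk before).contains k && !(PySem.Dict.mk after).contains k),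
       u ++ U.filter (fun k => (PySem.Dict.mk before).contains k && (PySem.Dict.mk after).contains k &&
              ((PySem.Dict.mk before).get? k != (PySem.Dict.mk after).get? k))) := by
  induction U generalizing a r u with
  | nil => simp
  | cons x xs ih =>
    simp only [List.foldl_cons, List.filter_cons, pvClassify]
    by_cases hb : (PySem.Dict.mk before).contains x = false
    · rw [if_pos hb, ih]; simp [hb, List.append_assoc]
    · rw [if_neg hb]
      replace hb : (PySem.Dict.mk before).contains x = true := by
        revert hb; cases (PySem.Dict.mk before).contains x <;> simp
      by_cases ha : (PySem.Dict.mk after).contains x = false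
      · rw [if_pos ha, ih]; simp [hb, ha, List.append_assoc]
      · rw [if_neg ha]
        replace ha : (PySem.Dict.mk after).contains x = true := by
          revert ha; cases (PySem.Dict.mk after).contains x <;> simp
        by_cases hg : ((PySem.Dict.mk before).get? x != (PySem.Dict.mk after).get? x) = true
        · rw [if_pos hg, ih]; simp [hb, ha, hg, List.append_assoc]
        · rw [if_neg hg, ih]
          replace hg : ((PySem.Dict.mk before).get? x != (PySem.Dict.mk after).get? x) = false := by
            revert hg; cases ((PySem.Dict.mk before).get? x != (PySem.Dict.mk after).get? x) <;> simp
          simp [hb, ha, hg]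

theorem sorted_eq_of_mem_iff (xs ys : List String) (hx : xs.Nodup) (hy : ys.Nodup)
    (h : ∀ k, k ∈ xs ↔ k ∈ ys) :
    PySem.List.sorted xs (fun x => x) false = PySem.List.sorted ys (fun x => x) false :=
  PySem.List.sorted_eq_sorted_of_perm xs ys (fun x => x) (fun _ _ h => h)
    ((List.perm_ext_iff_of_nodup hx hy).2 h)

-- ===== VERDICT (by name: the statement is the Claim_ definition above) =====
set_option maxHeartbeats 2000000 in
theorem summarize_package_delta_spec : Claim_equal_summarize_package_delta := by
  intro before after _
  unfold Spec_summarize_package_delta summarize_package_delta summarize_package_delta_alt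
  rw [foldl_pvClassify]
  simp only [List.nil_append]
  have hadded : PySem.List.sorted (PySem.Set.diff (PySem.Set.ofList (after.map Prod.fst)) (PySem.Set.ofList (before.map Prod.fst))) (fun x => x) false
      = PySem.List.sorted ((PySem.List.dedup (before.map Prod.fst ++ after.map Prod.fst)).filter (fun k => !(PySem.Dict.mk before).contains k)) (fun x => x) false := by
    apply sorted_eq_of_mem_iff
    · exact PySem.Set.nodup_diff _ _ (PySem.Set.nodup_ofList _)
    · exact (PySem.List.nodup_dedup _).filter _
    · intro k
      simp [pysem, PySem.Dict.contains]
      constructor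
      · rintro ⟨ha, hb⟩
        exact ⟨Or.inr ha, fun a b hab hak => hb b (by rwa [hak] at hab)⟩
      · rintro ⟨hor, hnb⟩
        refine ⟨?_, fun x hx => hnb k x hx rfl⟩
        rcases hor with ⟨x, hx⟩ | ha
        · exact absurd rfl (hnb k x hx)
        · exact ha
  have hremoved : PySem.List.sorted (PySem.Set.diff (PySem.Set.ofList (before.map Prod.fst)) (PySem.Set.ofList (after.map Prod.fst))) (fun x => x) false
      = PySem.List.sorted ((PySem.List.dedup (before.map Prod.fst ++ after.map Prod.fst)).filter (fun k => (PySem.Dict.mk before).contains k && !(PySem.Dict.mk after).contains k)) (fun x => x) false := by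
    apply sorted_eq_of_mem_iff
    · exact PySem.Set.nodup_diff _ _ (PySem.Set.nodup_ofList _)
    · exact (PySem.List.nodup_dedup _).filter _
    · intro k
      simp [pysem, PySem.Dict.contains]
      constructor
      · rintro ⟨hb, hna⟩
        exact ⟨Or.inl hb, hb, fun a b hab hak => hna b (by rwa [hak] at hab)⟩
      · rintro ⟨-, hb, hna⟩
        exact ⟨hb, fun x hx => hna k x hx rfl⟩
  have hupdated : PySem.List.sorted ((PySem.Set.inter (PySem.Set.ofList (before.map Prod.fst)) (PySem.Set.ofList (after.map Prod.fst))).filter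
        (fun key => (PySem.Dict.mk before).get? key != (PySem.Dict.mk after).get? key)) (fun x => x) false
      = PySem.List.sorted ((PySem.List.dedup (before.map Prod.fst ++ after.map Prod.fst)).filter (fun k => (PySem.Dict.mk before).contains k && (PySem.Dict.mk after).contains k && ((PySem.Dict.mk before).get? k != (PySem.Dict.mk after).get? k))) (fun x => x) false := by
    apply sorted_eq_of_mem_iff
    · exact (PySem.Set.nodup_inter _ _ (PySem.Set.nodup_ofList _)).filter _
    · exact (PySem.List.nodup_dedup _).filter _
    · intro k
      simp [pysem, PySem.Dict.contains]
      intro x hx x' hx' _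
      exact Or.inl ⟨x, hx⟩
  rw [hadded, hremoved, hupdated]
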